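-- pv_equiv track=rewrite | github.com/berkmm1/oveQ. | ove_qdk/quantum_agentic_engine/src/python/algorithms/quantum_grover.py | _find_pattern_matches
-- ===== SOURCE A (Python) =====
-- from typing import List, Dict, Tuple, Optional, Callable, Any, Union, Set
--
-- def _find_pattern_matches(pattern: str, num_qubits: int) -> List[int]:
--     """Find all states matching the pattern"""
--     matches = []
--     wildcard = '*'
--
--     for state in range(2 ** num_qubits):
--         binary = format(state, f'0{num_qubits}b')
--         match = True
--
--         for i, (p_bit, b_bit) in enumerate(zip(pattern, binary)):
--             if p_bit != wildcard and p_bit != b_bit: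
--                 match = False
--                 break
--
--         if match:
--             matches.append(state)
--
--     return matches
-- ===== SOURCE B (Python) =====
-- def _find_pattern_matches(pattern: str, num_qubits: int) -> list:
--     """Find all states matching the pattern (only matching states are built)"""
--     states = [0]
--     for i in range(num_qubits):
--         c = pattern[i] if i < len(pattern) else '*'
--         bits = (0, 1) if c == '*' else (0,) if c == '0' else (1,) if c == '1' else ()
--         states = [2 * s + b for s in states for b in bits]
--     return states
-- ===== Notes on version B (the rewrite author's own statement) =====
-- stated objective: alternative
-- what changed: Instead of enumerating all 2^n states and testing each against the pattern, B builds only the matching states directly, extending partial states bit by bit with the bit values each pattern position allows (intended as output-sensitive; a timing run could not confirm a ratio: A timed out at n=64 where B returned, and at the largest size both finished B read 1.22x).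
-- intended difference: For num_qubits = 0 with a pattern whose first character is neither '*' nor '0', A compares the pattern against the phantom digit of format(0,'00b') == '0' and returns [], while B returns [0], the single zero-bit state, which is intended since pattern positions beyond num_qubits are otherwise ignored. — e.g. on _find_pattern_matches("1", 0): A returns [], B returns [0]
import Mathlib
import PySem

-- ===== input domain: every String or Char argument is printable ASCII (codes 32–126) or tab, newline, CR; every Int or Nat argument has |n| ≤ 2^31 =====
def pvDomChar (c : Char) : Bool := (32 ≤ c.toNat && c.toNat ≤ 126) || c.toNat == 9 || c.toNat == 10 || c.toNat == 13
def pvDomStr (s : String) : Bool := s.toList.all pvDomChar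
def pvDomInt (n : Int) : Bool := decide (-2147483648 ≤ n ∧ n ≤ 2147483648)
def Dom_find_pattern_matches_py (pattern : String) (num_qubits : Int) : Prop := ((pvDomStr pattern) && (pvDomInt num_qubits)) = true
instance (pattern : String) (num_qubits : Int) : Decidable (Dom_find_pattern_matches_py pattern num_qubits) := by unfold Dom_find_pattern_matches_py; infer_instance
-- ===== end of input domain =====

-- B builds only the states matching the pattern (extending partial states bit by bit with the
-- allowed bit values) instead of testing every one of the 2^n states against the pattern; on
-- num_qubits = 0 with a pattern starting in neither '*' nor '0', A's phantom format digit makes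
-- it return [] while B returns [0] — stated as the intended difference D_ below.


-- ===== PORT A =====
-- hand port of Python's binary digits (MSB first, no digits for 0), used by format(state, f'0{n}b')
def pvBinCore : Nat → List Char
  | 0 => []
  | s+1 => pvBinCore ((s+1)/2) ++ [if (s+1) % 2 = 1 then '1' else '0']

-- hand port of format(state, f'0{width}b') for state ≥ 0: at least one digit, zero-padded to width; exact there
def pvFormatBin (state : Nat) (width : Nat) : List Char :=
  let ds := if state = 0 then ['0'] else pvBinCore state
  List.replicate (width - ds.length) '0' ++ ds

def pvBitOk (pb : Char × Char) : Bool := pb.1 == '*' || pb.1 == pb.2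

-- port of A; '2 ** num_qubits' as 2 ^ num_qubits.toNat (Python raises for num_qubits < 0: outside Pre_);
-- the inner for-loop with break is the 'all' over the zipped pairs
def find_pattern_matches_py (pattern : String) (num_qubits : Int) : List Int :=
  (PySem.List.pyRange 0 ((2 : Int) ^ num_qubits.toNat) 1).foldl
    (fun matchList state =>
      if (pattern.toList.zip (pvFormatBin state.toNat num_qubits.toNat)).all pvBitOk
      then matchList ++ [state] else matchList) []

-- ===== PORT B =====
-- bits allowed at position i: pattern[i] if i < len(pattern) else '*'
def pvAllowed (pattern : List Char) (i : Nat) : List Int :=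
  let c := pattern.getD i '*'
  if c == '*' then [0, 1] else if c == '0' then [0] else if c == '1' then [1] else []

def find_pattern_matches_py_alt (pattern : String) (num_qubits : Int) : List Int :=
  (List.range num_qubits.toNat).foldl
    (fun states i => states.flatMap (fun s => (pvAllowed pattern.toList i).map (fun b => 2 * s + b)))
    [0]

-- ===== PRECONDITION & SPEC =====
-- Pre_ excludes num_qubits < 0, where Python's 2 ** num_qubits is a float and range() raises TypeError
def Pre_find_pattern_matches_py (pattern : String) (num_qubits : Int) : Prop := 0 ≤ num_qubits
instance (pattern : String) (num_qubits : Int) : Decidable (Pre_find_pattern_matches_py pattern num_qubits) := by unfold Pre_find_pattern_matches_py; infer_instance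
def pvWitness_find_pattern_matches_py : String × Int := ("1*", 2)

-- For num_qubits = 0 with a pattern whose first character is neither '*' nor '0', A compares the
-- pattern against the phantom digit of format(0, '00b') == '0' and returns [], while B returns [0],
-- the single zero-bit state — intended, since pattern positions beyond num_qubits are otherwise ignored.
def D_find_pattern_matches_py (pattern : String) (num_qubits : Int) : Prop :=
  num_qubits = 0 ∧ match pattern.toList with
    | [] => False
    | c :: _ => ¬(c = '*' ∨ c = '0')
instance (pattern : String) (num_qubits : Int) : Decidable (D_find_pattern_matches_py pattern num_qubits) := by
  unfold D_find_pattern_matches_py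
  cases pattern.toList <;> infer_instance

def Spec_find_pattern_matches_py (pattern : String) (num_qubits : Int) (out : List Int) : Prop :=
  ¬ D_find_pattern_matches_py pattern num_qubits → out = find_pattern_matches_py_alt pattern num_qubits
instance (pattern : String) (num_qubits : Int) (out : List Int) : Decidable (Spec_find_pattern_matches_py pattern num_qubits out) := by unfold Spec_find_pattern_matches_py; infer_instance

def pvDiffWitness_find_pattern_matches_py : String × Int := ("1", 0)
def pvDiffWitnessOut_find_pattern_matches_py : (List Int) × (List Int) := ([], [0])

-- ===== CLAIM (what is proved, stated in full; the proofs are below) =====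
def Claim_unchanged_find_pattern_matches_py : Prop := ∀ (pattern : String) (num_qubits : Int), Dom_find_pattern_matches_py pattern num_qubits → Pre_find_pattern_matches_py pattern num_qubits → Spec_find_pattern_matches_py pattern num_qubits (find_pattern_matches_py pattern num_qubits)
def Claim_changed_find_pattern_matches_py : Prop := Dom_find_pattern_matches_py (pvDiffWitness_find_pattern_matches_py.1) (pvDiffWitness_find_pattern_matches_py.2) ∧ Pre_find_pattern_matches_py (pvDiffWitness_find_pattern_matches_py.1) (pvDiffWitness_find_pattern_matches_py.2) ∧ D_find_pattern_matches_py (pvDiffWitness_find_pattern_matches_py.1) (pvDiffWitness_find_pattern_matches_py.2) ∧ find_pattern_matches_py (pvDiffWitness_find_pattern_matches_py.1) (pvDiffWitness_find_pattern_matches_py.2) = pvDiffWitnessOut_find_pattern_matches_py.1 ∧ find_pattern_matches_py_alt (pvDiffWitness_find_pattern_matches_py.1) (pvDiffWitness_find_pattern_matches_py.2) = pvDiffWitnessOut_find_pattern_matches_py.2 ∧ pvDiffWitnessOut_find_pattern_matches_py.1 ≠ pvDiffWitnessOut_find_pattern_matches_py.2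
def Claim_exact_find_pattern_matches_py : Prop := ∀ (pattern : String) (num_qubits : Int), Dom_find_pattern_matches_py pattern num_qubits → Pre_find_pattern_matches_py pattern num_qubits → D_find_pattern_matches_py pattern num_qubits → find_pattern_matches_py pattern num_qubits ≠ find_pattern_matches_py_alt pattern num_qubits

-- ===== LEMMAS AND PROOFS =====

-- the exact width-w binary string of s (MSB first), the clean spine of the induction
def idealBin : Nat → Nat → List Char
  | 0, _ => []
  | w+1, s => idealBin w (s / 2) ++ [if s % 2 = 1 then '1' else '0']

def pvAllowedN (pattern : List Char) (i : Nat) : List Nat :=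
  let c := pattern.getD i '*'
  if c == '*' then [0, 1] else if c == '0' then [0] else if c == '1' then [1] else []

def pvBNat (p : List Char) (n : Nat) : List Nat :=
  (List.range n).foldl
    (fun states i => states.flatMap (fun s => (pvAllowedN p i).map (fun b => 2 * s + b))) [0]

lemma idealBin_length (w s : Nat) : (idealBin w s).length = w := by
  induction w generalizing s with
  | zero => rfl
  | succ w ih => simp [idealBin, ih]

lemma zip_append_right (p xs : List Char) (ys : List Char) (h : p.length ≤ xs.length) :
    p.zip (xs ++ ys) = p.zip xs := by
  induction p generalizing xs with
  | nil => simp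
  | cons a p ih =>
    cases xs with
    | nil => simp at h
    | cons b xs => simp_all

-- okBit p w b: the pattern allows bit b at position w
def okBit (p : List Char) (w : Nat) (b : Nat) : Bool :=
  match p[w]? with
  | none => true
  | some c => pvBitOk (c, if b = 1 then '1' else '0')

lemma matchI_step (p : List Char) (w s b : Nat) (hb : b < 2) :
    (p.zip (idealBin (w+1) (2*s + b))).all pvBitOk
      = ((p.zip (idealBin w s)).all pvBitOk && okBit p w b) := by
  have h2 : (2*s + b) / 2 = s := by omega
  have h3 : (2*s + b) % 2 = b := by omega
  have hbin : idealBin (w+1) (2*s+b) = idealBin w s ++ [if b = 1 then '1' else '0'] := by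
    simp [idealBin, h2, h3]
  rw [hbin]
  by_cases hp : p.length ≤ w
  · rw [zip_append_right _ _ _ (by rw [idealBin_length]; exact hp)]
    have : p[w]? = none := by simp [List.getElem?_eq_none_iff]; omega
    simp [okBit, this]
  · push_neg at hp
    have hsplit : p = p.take w ++ p.drop w := by simp
    have hlen : (p.take w).length = (idealBin w s).length := by
      rw [idealBin_length]; simp; omega
    have hz : p.zip (idealBin w s ++ [if b = 1 then '1' else '0'])
        = (p.take w).zip (idealBin w s) ++ (p.drop w).zip [if b = 1 then '1' else '0'] := by
      conv_lhs => rw [hsplit]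
      exact List.zip_append hlen
    have hz0 : p.zip (idealBin w s) = (p.take w).zip (idealBin w s) := by
      conv_lhs => rw [hsplit, show idealBin w s = idealBin w s ++ ([] : List Char) from (List.append_nil _).symm]
      rw [List.zip_append hlen]
      simp
    obtain ⟨c, rest, hdrop⟩ : ∃ c rest, p.drop w = c :: rest := by
      cases hd : p.drop w with
      | nil => exfalso; have := List.length_drop (l := p) (i := w); rw [hd] at this; simp at this; omega
      | cons c rest => exact ⟨c, rest, rfl⟩
    have hc : p[w]? = some c := by
      rw [show w = w + 0 from rfl, ← List.getElem?_drop, hdrop]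
      rfl
    rw [hz, ← hz0, List.all_append, okBit, hc]
    rw [hdrop]
    simp [List.zip]
  
lemma pvRangeTwoMul (m : Nat) :
    List.range (2 * m) = (List.range m).flatMap (fun s => [2*s, 2*s+1]) := by
  induction m with
  | zero => rfl
  | succ m ih =>
    have : 2 * (m+1) = (2*m + 1) + 1 := by ring
    rw [this, List.range_succ, List.range_succ, List.range_succ, ih]
    simp [List.flatMap_append]

lemma flatMap_ite_filter (l : List Nat) (m : Nat → Bool) (f : Nat → List Nat) :
    l.flatMap (fun s => if m s then f s else []) = (l.filter m).flatMap f := by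
  induction l with
  | nil => rfl
  | cons a l ih =>
    by_cases h : m a <;> simp [h, ih]

lemma filter_pair (p : List Char) (w s : Nat) :
    List.filter (fun t => (p.zip (idealBin (w+1) t)).all pvBitOk) [2*s, 2*s+1]
      = if (p.zip (idealBin w s)).all pvBitOk
        then (pvAllowedN p w).map (fun b => 2*s + b) else [] := by
  have e0 : (p.zip (idealBin (w+1) (2*s))).all pvBitOk
      = ((p.zip (idealBin w s)).all pvBitOk && okBit p w 0) := matchI_step p w s 0 (by omega)
  have e1 := matchI_step p w s 1 (by omega)
  rw [show List.filter (fun t => (p.zip (idealBin (w+1) t)).all pvBitOk) [2*s, 2*s+1]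
      = (if (p.zip (idealBin (w+1) (2*s))).all pvBitOk then [2*s] else [])
        ++ (if (p.zip (idealBin (w+1) (2*s+1))).all pvBitOk then [2*s+1] else []) from by
    rw [List.filter_cons, List.filter_cons, List.filter_nil]
    split_ifs <;> rfl]
  rw [e0, e1]
  by_cases hm : (p.zip (idealBin w s)).all pvBitOk
  · rw [hm]
    simp only [Bool.true_and]
    by_cases hw : p.length ≤ w
    · have hnone : p[w]? = none := by rw [List.getElem?_eq_none_iff]; omega
      have hgd : p.getD w '*' = '*' := by simp [List.getD, hnone]
      have o0 : okBit p w 0 = true := by simp [okBit, hnone]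
      have o1 : okBit p w 1 = true := by simp [okBit, hnone]
      simp [o0, o1, pvAllowedN, hnone]
    · push_neg at hw
      obtain ⟨c, hc⟩ : ∃ c, p[w]? = some c := ⟨p[w], List.getElem?_eq_getElem hw⟩
      have o0 : okBit p w 0 = (c == '*' || c == '0') := by simp [okBit, hc, pvBitOk]
      have o1 : okBit p w 1 = (c == '*' || c == '1') := by simp [okBit, hc, pvBitOk]
      rw [o0, o1]
      simp only [pvAllowedN, List.getD, hc, Option.getD_some]
      split_ifs <;> simp_all
  · simp [hm]

lemma pvBNat_eq_filter (p : List Char) (w : Nat) :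
    pvBNat p w = (List.range (2^w)).filter (fun s => (p.zip (idealBin w s)).all pvBitOk) := by
  induction w with
  | zero => simp [pvBNat, idealBin]
  | succ w ih =>
    have hstep : pvBNat p (w+1)
        = (pvBNat p w).flatMap (fun s => (pvAllowedN p w).map (fun b => 2*s + b)) := by
      simp [pvBNat, List.range_succ, List.foldl_append]
    rw [hstep, ih]
    have h2 : 2 ^ (w+1) = 2 * 2 ^ w := by ring
    rw [h2, pvRangeTwoMul, List.filter_flatMap]
    rw [← flatMap_ite_filter]
    apply List.flatMap_congr
    intro s _
    exact (filter_pair p w s).symm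
  
-- pvFormatBin agrees with idealBin on in-range values (width ≥ 1)
lemma pvBinCore_one : pvBinCore 1 = ['1'] := by
  simp [pvBinCore]

lemma pvBinCore_pos (s : Nat) (hs : 0 < s) :
    pvBinCore s = pvBinCore (s / 2) ++ [if s % 2 = 1 then '1' else '0'] := by
  cases s with
  | zero => omega
  | succ n => simp only [pvBinCore]

lemma pvFormatBin_append (s b w : Nat) (hw : 1 ≤ w) (hb : b < 2) :
    pvFormatBin (2*s + b) (w+1) = pvFormatBin s w ++ [if b = 1 then '1' else '0'] := by
  rcases Nat.eq_zero_or_pos s with hs | hs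
  · subst hs
    have hrep : List.replicate w '0' = List.replicate (w-1) '0' ++ ['0'] := by
      rw [show w = (w-1)+1 by omega, List.replicate_succ']
      simp [show w - 1 + 1 - 1 = w - 1 by omega]
    interval_cases b
    · simp [pvFormatBin, hrep]
    · simp [pvFormatBin, pvBinCore_one, hrep]
  · have hpos : 0 < 2*s + b := by omega
    have h2 : (2*s + b) / 2 = s := by omega
    have h3 : (2*s + b) % 2 = b := by omega
    have hcore := pvBinCore_pos (2*s + b) hpos
    rw [h2, h3] at hcore
    have hs0 : ¬ s = 0 := by omega
    have hsb0 : ¬ 2*s + b = 0 := by omega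
    simp only [pvFormatBin, if_neg hs0, if_neg hsb0, hcore]
    simp only [List.length_append, List.length_cons, List.length_nil]
    rw [show w + 1 - ((pvBinCore s).length + (0 + 1)) = w - (pvBinCore s).length by omega]
    simp [List.append_assoc]

lemma pvFormatBin_eq_idealBin (w s : Nat) (hw : 1 ≤ w) (hs : s < 2^w) :
    pvFormatBin s w = idealBin w s := by
  induction w generalizing s with
  | zero => omega
  | succ w ih =>
    rcases Nat.eq_zero_or_pos w with hw0 | hwpos
    · subst hw0
      interval_cases s
      · simp [pvFormatBin, idealBin]
      · simp [pvFormatBin, idealBin, pvBinCore_one]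
    · have hsplit : s = 2 * (s / 2) + s % 2 := by omega
      have hmod : s % 2 < 2 := by omega
      have hdiv : s / 2 < 2 ^ w := by
        have : 2 ^ (w+1) = 2 * 2 ^ w := by ring
        omega
      conv_lhs => rw [hsplit]
      rw [pvFormatBin_append _ _ _ hwpos hmod, ih _ hwpos hdiv]
      have h2 : (2 * (s / 2) + s % 2) / 2 = s / 2 := by omega
      have h3 : (2 * (s / 2) + s % 2) % 2 = s % 2 := by omega
      simp [idealBin]

-- cast B's port down to the Nat-level fold
lemma pvAllowed_eq_map (p : List Char) (i : Nat) :
    pvAllowed p i = (pvAllowedN p i).map (Nat.cast : Nat → Int) := by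
  simp only [pvAllowed, pvAllowedN]
  split_ifs <;> rfl

lemma alt_eq_BNat (pattern : String) (num_qubits : Int) :
    find_pattern_matches_py_alt pattern num_qubits
      = (pvBNat pattern.toList num_qubits.toNat).map (Nat.cast : Nat → Int) := by
  unfold find_pattern_matches_py_alt pvBNat
  generalize List.range num_qubits.toNat = l
  suffices h : ∀ (l : List Nat) (states : List Nat),
      l.foldl (fun states i => states.flatMap (fun s => (pvAllowed pattern.toList i).map (fun b => 2 * s + b)))
        (states.map (Nat.cast : Nat → Int))
      = (l.foldl (fun states i => states.flatMap (fun s => (pvAllowedN pattern.toList i).map (fun b => 2 * s + b))) states).map (Nat.cast : Nat → Int) by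
    simpa using h l [0]
  intro l
  induction l with
  | nil => intro states; rfl
  | cons i l ih =>
    intro states
    rw [List.foldl_cons, List.foldl_cons, ← ih]
    congr 1
    rw [pvAllowed_eq_map, List.map_flatMap, List.flatMap_map]
    apply List.flatMap_congr
    intro s _
    rw [List.map_map, List.map_map]
    apply List.map_congr_left
    intro b _
    simp only [Function.comp_def]
    push_cast
    ring

-- A's fold is a filter over the cast range
lemma a_eq_filter (pattern : String) (num_qubits : Int) :
    find_pattern_matches_py pattern num_qubits
      = ((List.range (2 ^ num_qubits.toNat)).filter
          (fun s => (pattern.toList.zip (pvFormatBin s num_qubits.toNat)).all pvBitOk)).map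
          (Nat.cast : Nat → Int) := by
  unfold find_pattern_matches_py
  rw [show ((2:Int) ^ num_qubits.toNat) = ((2 ^ num_qubits.toNat : Nat) : Int) by push_cast; ring]
  rw [PySem.List.pyRange_one]
  simp only [sub_zero, Int.toNat_natCast, zero_add]
  rw [show (fun (matchList : List Int) (state : Int) =>
        if (pattern.toList.zip (pvFormatBin state.toNat num_qubits.toNat)).all pvBitOk
        then matchList ++ [state] else matchList)
      = (fun (matchList : List Int) (state : Int) =>
        if (fun st => (pattern.toList.zip (pvFormatBin st.toNat num_qubits.toNat)).all pvBitOk) state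
        then matchList ++ [id state] else matchList) from rfl]
  rw [List.foldl_map, ]
  rw [PySem.List.foldl_append_if
      (fun (k : Nat) => (pattern.toList.zip (pvFormatBin (((k:Int)).toNat) num_qubits.toNat)).all pvBitOk)
      (fun (k : Nat) => id ((k : Int)))]
  simp only [List.nil_append, id_eq, Int.toNat_natCast]

-- the n = 0 case, outside D_
lemma n_zero_case (pattern : String) (num_qubits : Int) (h0 : num_qubits.toNat = 0)
    (hnD : ¬ D_find_pattern_matches_py pattern num_qubits) (hpre : 0 ≤ num_qubits) :
    find_pattern_matches_py pattern num_qubits = find_pattern_matches_py_alt pattern num_qubits := by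
  have hq : num_qubits = 0 := by omega
  subst hq
  rw [a_eq_filter, alt_eq_BNat]
  simp only [Int.toNat_zero, pow_zero] at *
  unfold D_find_pattern_matches_py at hnD
  cases hp : pattern.toList with
  | nil => simp [pvBNat, pvFormatBin, hp]
  | cons c rest =>
    rw [hp] at hnD
    have hc : c = '*' ∨ c = '0' := by
      by_contra hcc
      exact hnD ⟨rfl, hcc⟩
    have : (pattern.toList.zip (pvFormatBin 0 0)).all pvBitOk = true := by
      rcases hc with h | h <;> simp [hp, h, pvFormatBin, pvBitOk]
    simp [pvBNat, List.range_succ, this, pvFormatBin, hp]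
    rcases hc with h | h <;> simp [h, pvBitOk]

-- ===== VERDICT (by name: the statement is the Claim_ definition above) =====
theorem find_pattern_matches_py_spec : Claim_unchanged_find_pattern_matches_py := by
  intro pattern num_qubits hDom hPre hnD
  show find_pattern_matches_py pattern num_qubits = find_pattern_matches_py_alt pattern num_qubits
  rcases Nat.eq_zero_or_pos num_qubits.toNat with h0 | hpos
  · exact n_zero_case pattern num_qubits h0 hnD hPre
  · rw [a_eq_filter, alt_eq_BNat, pvBNat_eq_filter]
    have hfc : List.filter (fun s => (pattern.toList.zip (pvFormatBin s num_qubits.toNat)).all pvBitOk)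
          (List.range (2 ^ num_qubits.toNat))
        = List.filter (fun s => (pattern.toList.zip (idealBin num_qubits.toNat s)).all pvBitOk)
          (List.range (2 ^ num_qubits.toNat)) := by
      apply List.filter_congr
      intro s hs
      rw [List.mem_range] at hs
      rw [pvFormatBin_eq_idealBin _ _ hpos hs]
    rw [hfc]

theorem find_pattern_matches_py_changed : Claim_changed_find_pattern_matches_py := by
  unfold Claim_changed_find_pattern_matches_py; decide

theorem find_pattern_matches_py_tight : Claim_exact_find_pattern_matches_py := by
  intro pattern num_qubits hDom hPre hD
  obtain ⟨hq, hpat⟩ := hD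
  subst hq
  rw [a_eq_filter, alt_eq_BNat]
  cases hp : pattern.toList with
  | nil => rw [hp] at hpat; exact absurd hpat (by simp)
  | cons c rest =>
    rw [hp] at hpat
    have hc1 : c ≠ '*' := fun h => hpat (Or.inl h)
    have hc2 : c ≠ '0' := fun h => hpat (Or.inr h)
    simp [pvBNat, pvFormatBin, hp, pvBitOk, hc1, hc2]
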